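-- pv_equiv track=rewrite | github.com/trihoang0809/Bacterial-Transmission-Elucidation | abc.py | find_first_positives
-- ===== SOURCE A (Python) =====
-- def find_first_positives(trace_data):
--     """
--         Finds the first positive test date of each patient
--         in the trace data.
--         Arguments:
--         trace_data -- a list of data pertaining to location
--         and first positive test date
--         Returns:
--         A dictionary with patient id's as keys and first positive
--         test date as values. The date numbering starts from 0 and
--         the patient numbering starts from 1.
--         """
--     first_pos = {}
--     for pat in range(len(trace_data[0])):
--         first_pos[pat + 1] = None
--         for date in range(len(trace_data)):
--             if trace_data[date][pat].endswith(".5"):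
--                 first_pos[pat + 1] = date
--                 break
--     return first_pos
-- ===== SOURCE B (Python) =====
-- def find_first_positives(trace_data):
--     n = len(trace_data[0])
--     first = [None] * n
--     for date, row in enumerate(trace_data):
--         first = [f if f is not None else (date if cell.endswith(".5") else None)
--                  for f, cell in zip(first, row)]
--     return dict(enumerate(first, start=1))
-- ===== Notes on version B (the rewrite author's own statement) =====
-- stated objective: alternative
-- what changed: A scans column-major (per patient, over dates, with an early break and a dict built key by key); B makes one row-major pass over the rows, folding each row into a fixed-size list of first-positive dates via zip, and builds the dict once at the end from enumerate.
-- outside the precondition, e.g. on find_first_positives([['.5'], []]): A returns {1: 0}, B returns {}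
import Mathlib
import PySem

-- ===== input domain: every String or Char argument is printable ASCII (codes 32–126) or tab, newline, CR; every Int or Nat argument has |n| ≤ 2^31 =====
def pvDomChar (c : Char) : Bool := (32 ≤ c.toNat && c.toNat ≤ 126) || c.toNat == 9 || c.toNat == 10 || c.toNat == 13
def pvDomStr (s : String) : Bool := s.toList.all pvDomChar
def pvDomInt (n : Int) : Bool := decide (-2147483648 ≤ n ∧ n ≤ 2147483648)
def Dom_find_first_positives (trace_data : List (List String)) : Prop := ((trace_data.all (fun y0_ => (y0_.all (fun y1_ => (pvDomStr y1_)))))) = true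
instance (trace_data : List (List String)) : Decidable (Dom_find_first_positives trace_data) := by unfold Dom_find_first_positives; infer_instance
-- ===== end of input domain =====

-- B replaces A's column-major per-patient scan (dict built key by key, inner break) with one
-- row-major pass folding each row into a list of first-positive dates; alternative decomposition, same cost.


-- ===== PORT A =====
-- inner loop 'for date in range(len(trace_data)): if trace_data[date][pat].endswith(".5"): first_pos[pat+1] = date; break'
-- as structural recursion over the rows carrying the date counter; row indexing r[pat] is exact under Pre_ (pat < r.length)
def ffp_inner (rows : List (List String)) (pat : Nat) (date : Int) (key : Int)
    (d : PySem.Dict Int (Option Int)) : PySem.Dict Int (Option Int) :=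
  match rows with
  | [] => d
  | r :: rs =>
      if PySem.Str.endswith (r.getD pat "") ".5" then d.insert key (some date)
      else ffp_inner rs pat (date + 1) key d

def find_first_positives (trace_data : List (List String)) : List (Int × Option Int) :=
  ((List.range (trace_data.headD []).length).foldl
    (fun d pat => ffp_inner trace_data pat 0 ((pat : Int) + 1) (d.insert ((pat : Int) + 1) none))
    PySem.Dict.empty).items

-- ===== PORT B =====
-- one row: first = [f if f is not None else (date if cell.endswith(".5") else None) for f, cell in zip(first, row)]
def ffp_step (date : Int) (first : List (Option Int)) (row : List String) : List (Option Int) :=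
  (first.zip row).map (fun fc =>
    match fc.1 with
    | some v => some v
    | none => if PySem.Str.endswith fc.2 ".5" then some date else none)

def ffp_scan (rows : List (List String)) (date : Int) (first : List (Option Int)) : List (Option Int) :=
  match rows with
  | [] => first
  | r :: rs => ffp_scan rs (date + 1) (ffp_step date first r)

-- dict(enumerate(first, start=1)): the keys 1..n are distinct, so the dict is the enumerate pair list itself
def find_first_positives_alt (trace_data : List (List String)) : List (Int × Option Int) :=
  PySem.List.enumerate
    (ffp_scan trace_data 0 (List.replicate (trace_data.headD []).length none)) 1

-- ===== PRECONDITION & SPEC =====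
-- Pre_ excludes empty trace_data (A raises IndexError on trace_data[0]) and ragged inputs with some
-- row shorter than the first row, on which A's column-major scan usually raises IndexError and, when
-- its per-column break stops before the short row, returns a value that is an accident of scan order.
def Pre_find_first_positives (trace_data : List (List String)) : Prop :=
  trace_data ≠ [] ∧ ∀ r ∈ trace_data, (trace_data.headD []).length ≤ r.length
instance (trace_data : List (List String)) : Decidable (Pre_find_first_positives trace_data) := by
  unfold Pre_find_first_positives; infer_instance

def pvWitness_find_first_positives : List (List String) := [["1", "2.5"], [".5", "x"]]

def Spec_find_first_positives (trace_data : List (List String)) (out : List (Int × Option Int)) : Prop := out = find_first_positives_alt trace_data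
instance (trace_data : List (List String)) (out : List (Int × Option Int)) : Decidable (Spec_find_first_positives trace_data out) := by unfold Spec_find_first_positives; infer_instance

-- ===== CLAIM (what is proved, stated in full; the proofs are below) =====
def Claim_equal_find_first_positives : Prop := ∀ (trace_data : List (List String)), Dom_find_first_positives trace_data → Pre_find_first_positives trace_data → Spec_find_first_positives trace_data (find_first_positives trace_data)

-- ===== LEMMAS AND PROOFS =====

-- the mathematical value both programs compute per patient: first date (counting from `date`) whose cell ends with ".5"
def pvFirstDate (rows : List (List String)) (pat : Nat) (date : Int) : Option Int :=
  match rows with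
  | [] => none
  | r :: rs =>
      if PySem.Str.endswith (r.getD pat "") ".5" then some date
      else pvFirstDate rs pat (date + 1)

lemma ffp_inner_insert (rows : List (List String)) (pat : Nat) (key : Int) :
    ∀ (date : Int) (d : PySem.Dict Int (Option Int)),
      ffp_inner rows pat date key (d.insert key none) = d.insert key (pvFirstDate rows pat date) := by
  induction rows with
  | nil => intro date d; simp [ffp_inner, pvFirstDate]
  | cons r rs ih =>
      intro date d
      cases h : PySem.Str.endswith (r.getD pat "") ".5" with
      | true =>
          simp only [ffp_inner, pvFirstDate, h, reduceIte]
          exact PySem.Dict.insert_insert_self ..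
      | false =>
          simp only [ffp_inner, pvFirstDate, h, Bool.false_eq_true, reduceIte]
          exact ih (date + 1) d

lemma portA_eq_map (trace_data : List (List String)) :
    find_first_positives trace_data =
      (List.range (trace_data.headD []).length).map
        (fun p : Nat => ((p : Int) + 1, pvFirstDate trace_data p 0)) := by
  unfold find_first_positives
  have hfun : (fun (d : PySem.Dict Int (Option Int)) (pat : Nat) =>
      ffp_inner trace_data pat 0 ((pat : Int) + 1) (d.insert ((pat : Int) + 1) none))
      = fun d pat => d.insert ((pat : Int) + 1) (pvFirstDate trace_data pat 0) := by
    funext d pat; exact ffp_inner_insert trace_data pat _ 0 d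
  rw [hfun]
  have hfresh := PySem.Dict.items_foldl_insert_fresh
      (l := List.range (trace_data.headD []).length)
      (k := fun p : Nat => ((p : Int) + 1))
      (v := fun p : Nat => pvFirstDate trace_data p 0)
      (d := PySem.Dict.empty)
      (by intro a _; simp [PySem.Dict.contains_empty])
      (by
        refine List.Nodup.map ?_ (List.nodup_range)
        intro a b hab
        simp at hab
        omega)
  simpa [PySem.Dict.empty] using hfresh

lemma ffp_scan_spec (rows : List (List String)) :
    ∀ (date : Int) (first : List (Option Int)),
      (∀ r ∈ rows, first.length ≤ r.length) →
      (ffp_scan rows date first).length = first.length ∧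
      ∀ (p : Nat) (hp : p < first.length),
        (ffp_scan rows date first)[p]? = some ((first[p]).or (pvFirstDate rows p date)) := by
  induction rows with
  | nil =>
      intro date first _
      refine ⟨rfl, ?_⟩
      intro p hp
      simp [ffp_scan, pvFirstDate, List.getElem?_eq_getElem hp]
  | cons r rs ih =>
      intro date first h
      have hr : first.length ≤ r.length := h r (by simp)
      have hlen : (ffp_step date first r).length = first.length := by
        simp [ffp_step, Nat.min_eq_left hr]
      have hrs : ∀ r' ∈ rs, (ffp_step date first r).length ≤ r'.length := by
        intro r' hr'; rw [hlen]; exact h r' (by simp [hr'])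
      obtain ⟨ihlen, ihget⟩ := ih (date + 1) (ffp_step date first r) hrs
      refine ⟨by simpa [hlen] using ihlen, ?_⟩
      intro p hp
      have hp' : p < (ffp_step date first r).length := by omega
      have hstep : (ffp_step date first r)[p] =
          (first[p]).or (if PySem.Str.endswith (r.getD p "") ".5" then some date else none) := by
        have hpr : p < r.length := lt_of_lt_of_le hp hr
        simp only [ffp_step]
        rw [List.getElem_map, List.getElem_zip]
        have : r.getD p "" = r[p] := by rw [List.getD_eq_getElem]
        rw [← this]
        cases hfp : first[p] with
        | none => simp
        | some v => simp
      have := ihget p hp'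
      rw [show ffp_scan (r :: rs) date first = ffp_scan rs (date + 1) (ffp_step date first r) from rfl]
      rw [this, hstep, Option.or_assoc]
      have htail : ((if PySem.Str.endswith (r.getD p "") ".5" then some date else none).or
          (pvFirstDate rs p (date + 1))) = pvFirstDate (r :: rs) p date := by
        cases hc : PySem.Str.endswith (r.getD p "") ".5" with
        | true => simp only [pvFirstDate, hc, reduceIte, Option.some_or]
        | false => simp only [pvFirstDate, hc, Bool.false_eq_true, reduceIte, Option.none_or]
      rw [htail]

lemma enumerate_getElem? {α : Type} (xs : List α) :
    ∀ (s : Int) (k : Nat),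
      (PySem.List.enumerate xs s)[k]? = (xs[k]?).map (fun x => (s + (k : Int), x)) := by
  induction xs with
  | nil => intro s k; simp [PySem.List.enumerate_nil]
  | cons x xs ih =>
      intro s k
      cases k with
      | zero => simp [PySem.List.enumerate_cons]
      | succ k =>
          rw [PySem.List.enumerate_cons]
          simp only [List.getElem?_cons_succ]
          rw [ih (s + 1) k]
          cases xs[k]? with
          | none => rfl
          | some y => simp; ring

-- ===== VERDICT (by name: the statement is the Claim_ definition above) =====
theorem find_first_positives_spec : Claim_equal_find_first_positives := by
  intro trace_data _ hpre
  unfold Spec_find_first_positives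
  obtain ⟨-, hrect⟩ := hpre
  set n := (trace_data.headD []).length with hn
  have hrep : ∀ r ∈ trace_data, (List.replicate n (none : Option Int)).length ≤ r.length := by
    intro r hr; simpa using hrect r hr
  obtain ⟨hlen, hget⟩ := ffp_scan_spec trace_data 0 (List.replicate n none) hrep
  rw [portA_eq_map]
  unfold find_first_positives_alt
  apply List.ext_getElem?
  intro k
  rw [enumerate_getElem?]
  by_cases hk : k < n
  · have h1 : ((List.range n).map (fun p : Nat => ((p : Int) + 1, pvFirstDate trace_data p 0)))[k]? =
        some (((k : Int)) + 1, pvFirstDate trace_data k 0) := by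
      simp [hk]
    rw [h1]
    have hk' : k < (List.replicate n (none : Option Int)).length := by simpa using hk
    have h2 := hget k hk'
    rw [show (List.replicate n (none : Option Int))[k]'hk' = none from List.getElem_replicate ..] at h2
    rw [h2]
    simp [Option.none_or, Int.add_comm]
  · have h1 : ((List.range n).map (fun p : Nat => ((p : Int) + 1, pvFirstDate trace_data p 0)))[k]? = none := by
      simp [List.getElem?_map]
      omega
    have h2 : (ffp_scan trace_data 0 (List.replicate n none))[k]? = none := by
      apply List.getElem?_eq_none
      simp [hlen]
      omega
    rw [h1, h2]
    rfl
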